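-- pv_equiv track=rewrite | github.com/seon-2/coding_test_log | 프로그래머스/1/12954. x만큼 간격이 있는 n개의 숫자/x만큼 간격이 있는 n개의 숫자.py | solution
-- ===== SOURCE A (Python) =====
-- def solution(x, n):
--     answer = []
--     end = n*x+1
--     if x == 0:
--         return [0] * n
--     elif x < 0:
--         end = n*x-1
--
--     for i in range(x, end, x):
--         answer.append(i)
--     return answer
-- ===== SOURCE B (Python) =====
-- def solution(x, n):
--     return [x * i for i in range(1, n + 1)]
-- ===== Notes on version B (the rewrite author's own statement) =====
-- stated objective: simpler
-- what changed: Replaces A's three sign branches (x==0 replication, negative-step range, positive-step range with stepped endpoints) by one uniform index-based comprehension x*i for i in 1..n.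
import Mathlib
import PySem

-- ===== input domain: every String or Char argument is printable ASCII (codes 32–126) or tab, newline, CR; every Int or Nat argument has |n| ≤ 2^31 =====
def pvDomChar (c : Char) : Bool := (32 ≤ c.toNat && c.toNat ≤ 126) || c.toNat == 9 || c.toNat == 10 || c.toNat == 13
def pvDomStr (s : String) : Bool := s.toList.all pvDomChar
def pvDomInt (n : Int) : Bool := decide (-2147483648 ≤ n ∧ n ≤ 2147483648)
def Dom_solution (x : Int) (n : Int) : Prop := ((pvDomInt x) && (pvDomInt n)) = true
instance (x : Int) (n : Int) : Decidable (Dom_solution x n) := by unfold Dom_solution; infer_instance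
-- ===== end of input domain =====

-- B replaces A's three sign branches by one uniform index comprehension [x*i for i in 1..n] (objective: simpler).

-- ===== PORT A =====
def solution (x : Int) (n : Int) : List Int :=
  -- answer = []; end = n*x+1
  let «end» := n * x + 1
  if x = 0 then
    -- [0] * n  (negative n gives the empty list)
    List.replicate n.toNat 0
  else
    let «end» := if x < 0 then n * x - 1 else «end»
    -- for i in range(x, end, x): answer.append(i); return answer
    (PySem.List.pyRange x «end» x).foldl (fun answer i => answer ++ [i]) []

-- ===== PORT B =====
def solution_alt (x : Int) (n : Int) : List Int :=
  (PySem.List.pyRange 1 (n + 1) 1).map (fun i => x * i)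

-- ===== PRECONDITION & SPEC =====
def Spec_solution (x : Int) (n : Int) (out : List Int) : Prop := out = solution_alt x n
instance (x : Int) (n : Int) (out : List Int) : Decidable (Spec_solution x n out) := by unfold Spec_solution; infer_instance

-- ===== CLAIM (what is proved, stated in full; the proofs are below) =====
def Claim_equal_solution : Prop := ∀ (x : Int) (n : Int), Dom_solution x n → Spec_solution x n (solution x n)

-- ===== LEMMAS AND PROOFS =====

theorem foldl_append_singleton (l acc : List Int) :
    l.foldl (fun answer i => answer ++ [i]) acc = acc ++ l := by
  induction l generalizing acc with
  | nil => simp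
  | cons a t ih => simp [List.foldl, ih, List.append_assoc]

theorem alt_eq_map_range (x n : Int) :
    solution_alt x n = (List.range n.toNat).map (fun k : Nat => x + x * (k : Int)) := by
  unfold solution_alt
  rw [PySem.List.pyRange_one]
  simp only [List.map_map]
  have hn : (n + 1 - 1).toNat = n.toNat := by omega
  rw [hn]
  apply List.map_congr_left
  intro k _
  simp
  ring

-- ===== VERDICT (by name: the statement is the Claim_ definition above) =====
theorem solution_spec : Claim_equal_solution := by
  intro x n _
  unfold Spec_solution solution
  rw [alt_eq_map_range]
  by_cases h0 : x = 0
  · subst h0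
    simp
  · simp only [if_neg h0]
    rw [foldl_append_singleton]
    simp only [List.nil_append]
    rcases lt_or_gt_of_ne h0 with hneg | hpos
    · rw [if_pos hneg, PySem.List.pyRange_of_neg _ _ hneg]
      have harg : (if n * x - 1 < x then ((x - (n * x - 1) + -x - 1) / -x).toNat else 0) = n.toNat := by
        split_ifs with hb
        · have h1 : x - (n * x - 1) + -x - 1 = n * (-x) := by ring
          rw [h1, Int.mul_ediv_cancel n (by omega : (-x : Int) ≠ 0)]
        · have hn : n ≤ 0 := by nlinarith
          omega
      rw [harg]
    · rw [if_neg (by omega : ¬ x < 0), PySem.List.pyRange_of_pos _ _ hpos]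
      have harg : (if x < n * x + 1 then ((n * x + 1 - x + x - 1) / x).toNat else 0) = n.toNat := by
        split_ifs with hb
        · have h1 : n * x + 1 - x + x - 1 = n * x := by ring
          rw [h1, Int.mul_ediv_cancel n h0]
        · have hn : n ≤ 0 := by nlinarith
          omega
      rw [harg]
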